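-- pv_equiv track=rewrite | github.com/Dsadd4/NLSExplorer_1.0 | Recommendation_system/NLSExplorer-accmodel.py | Indicate_label_ge
-- ===== SOURCE A (Python) =====
-- def ju_cover(seg,label):
--
--     if seg[0]<=label[1] and label[0]<=seg[0]:
--         return True
--     if seg[1]<=label[1] and label[0]<=seg[1]:
--         return True
--     if seg[0]<=label[0] and seg[1]>=label[1]:
--         return True
--     if seg[0]>=label[0] and seg[1]<=label[1]:
--         return True
--     return False
--
-- def Indicate_label_ge(ins_label, pre_seg):
--     indi_li = []
--     for sgggs in pre_seg:
--         Flag = 0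
--         for label in ins_label:
--             if ju_cover((sgggs[0]+1,sgggs[1]+1),label):
--                 Flag = 1
--         if Flag == 1:
--             indi_li.append(1)
--         else:
--             indi_li.append(0)
--     return indi_li
-- ===== SOURCE B (Python) =====
-- def _bisect_right(xs, x):
--     lo, hi = 0, len(xs)
--     while lo < hi:
--         mid = (lo + hi) // 2
--         if x < xs[mid]:
--             hi = mid
--         else:
--             lo = mid + 1
--     return lo
--
--
-- def _bisect_left(xs, x):
--     lo, hi = 0, len(xs)
--     while lo < hi:
--         mid = (lo + hi) // 2
--         if xs[mid] < x:
--             lo = mid + 1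
--         else:
--             hi = mid
--     return lo
--
--
-- def Indicate_label_ge(ins_label, pre_seg):
--     # Preprocess the labels once: sort them by left end and keep a running
--     # prefix-max and suffix-min of the right ends.  Each clause of the coverage
--     # test ("an endpoint of the shifted segment lies in some label, or one of
--     # the two intervals contains the other") is a dominance query -- "is there
--     # a label whose left end is <= x (resp. >= x) and whose right end reaches
--     # y?" -- answered by one binary search into the sorted left ends.
--     labs = sorted(ins_label, key=lambda p: p[0])
--     starts = [p[0] for p in labs]
--     ends = [p[1] for p in labs]
--     prefmax = []
--     m = None
--     for e in ends:
--         m = e if m is None or e > m else m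
--         prefmax.append(m)
--     sufmin = []
--     m = None
--     for e in reversed(ends):
--         m = e if m is None or e < m else m
--         sufmin.append(m)
--     sufmin.reverse()
--
--     def reaches_up(x, y):
--         # some label with left end <= x and right end >= y?
--         k = _bisect_right(starts, x)
--         return k > 0 and prefmax[k - 1] >= y
--
--     def reaches_down(x, y):
--         # some label with left end >= x and right end <= y?
--         k = _bisect_left(starts, x)
--         return k < len(starts) and sufmin[k] <= y
--
--     out = []
--     for a, b in pre_seg:
--         s0, s1 = a + 1, b + 1
--         hit = (reaches_up(s0, s0) or reaches_up(s1, s1)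
--                or reaches_up(s0, s1) or reaches_down(s0, s1))
--         out.append(1 if hit else 0)
--     return out
-- ===== Notes on version B (the rewrite author's own statement) =====
-- stated objective: faster
-- what changed: B sorts the labels once by left end and precomputes prefix-max / suffix-min arrays of the right ends; each of the four coverage clauses per segment then becomes a dominance query answered by one binary search, replacing A's rescan of every label for every segment.
import Mathlib
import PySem

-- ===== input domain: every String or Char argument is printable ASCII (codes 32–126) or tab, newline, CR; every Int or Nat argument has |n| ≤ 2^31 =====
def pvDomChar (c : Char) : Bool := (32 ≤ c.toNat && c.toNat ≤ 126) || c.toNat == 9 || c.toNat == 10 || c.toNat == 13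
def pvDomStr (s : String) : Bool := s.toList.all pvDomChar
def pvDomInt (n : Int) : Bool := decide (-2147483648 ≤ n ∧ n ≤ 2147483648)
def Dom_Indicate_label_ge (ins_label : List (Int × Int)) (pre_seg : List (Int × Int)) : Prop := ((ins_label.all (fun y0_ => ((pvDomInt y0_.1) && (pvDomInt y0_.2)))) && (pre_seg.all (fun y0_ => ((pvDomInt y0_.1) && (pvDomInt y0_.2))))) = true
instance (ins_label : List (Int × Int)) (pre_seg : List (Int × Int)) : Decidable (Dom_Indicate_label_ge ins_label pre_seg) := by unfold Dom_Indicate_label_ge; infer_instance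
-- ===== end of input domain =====

-- B sorts the labels once by left end with prefix-max / suffix-min arrays of the right ends and
-- answers each coverage clause per segment by one binary search (dominance query), replacing A's
-- rescan of every label for every segment; objective: faster (O((n+m) log m) vs O(n*m)).

-- ===== PORT A =====
def juCover (seg : Int × Int) (label : Int × Int) : Bool :=
  if seg.1 ≤ label.2 ∧ label.1 ≤ seg.1 then true
  else if seg.2 ≤ label.2 ∧ label.1 ≤ seg.2 then true
  else if seg.1 ≤ label.1 ∧ seg.2 ≥ label.2 then true
  else if seg.1 ≥ label.1 ∧ seg.2 ≤ label.2 then true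
  else false

def Indicate_label_ge (ins_label : List (Int × Int)) (pre_seg : List (Int × Int)) : List Int :=
  pre_seg.foldl (fun indi_li sgggs =>
    let flag : Int := ins_label.foldl
      (fun fl label => if juCover (sgggs.1 + 1, sgggs.2 + 1) label then 1 else fl) 0
    if flag = 1 then indi_li ++ [(1 : Int)] else indi_li ++ [(0 : Int)]) []

-- ===== PORT B =====
-- running maximum: m = e if m is None or e > m else m; out.append(m)
def pvRunMax (xs : List Int) : List Int :=
  (xs.foldl (fun st e =>
    let m := match st.1 with | none => e | some m0 => if e > m0 then e else m0
    (some m, st.2 ++ [m])) ((none : Option Int), ([] : List Int))).2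

-- running minimum, same loop shape
def pvRunMin (xs : List Int) : List Int :=
  (xs.foldl (fun st e =>
    let m := match st.1 with | none => e | some m0 => if e < m0 then e else m0
    (some m, st.2 ++ [m])) ((none : Option Int), ([] : List Int))).2

-- Source B's hand-written _bisect_right/_bisect_left are CPython's bisect loops, ported as
-- PySem.List.bisectRight / bisectLeft (the identical lo/hi halving loop).
def pvReachesUp (starts prefmax : List Int) (x y : Int) : Bool :=
  let k := PySem.List.bisectRight starts x
  decide (0 < k) && decide (y ≤ prefmax.getD (k - 1) 0)

def pvReachesDown (starts sufmin : List Int) (x y : Int) : Bool :=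
  let k := PySem.List.bisectLeft starts x
  decide (k < starts.length) && decide (sufmin.getD k 0 ≤ y)

def Indicate_label_ge_alt (ins_label : List (Int × Int)) (pre_seg : List (Int × Int)) : List Int :=
  let labs := PySem.List.sorted ins_label (fun p => p.1) false
  let starts := labs.map (fun p => p.1)
  let ends := labs.map (fun p => p.2)
  let prefmax := pvRunMax ends
  let sufmin := (pvRunMin ends.reverse).reverse
  pre_seg.foldl (fun out sg =>
    let s0 := sg.1 + 1
    let s1 := sg.2 + 1
    let hit := pvReachesUp starts prefmax s0 s0 || pvReachesUp starts prefmax s1 s1 ||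
               pvReachesUp starts prefmax s0 s1 || pvReachesDown starts sufmin s0 s1
    out ++ [if hit then (1 : Int) else 0]) []

-- ===== PRECONDITION & SPEC =====
def Spec_Indicate_label_ge (ins_label : List (Int × Int)) (pre_seg : List (Int × Int)) (out : List Int) : Prop := out = Indicate_label_ge_alt ins_label pre_seg
instance (ins_label : List (Int × Int)) (pre_seg : List (Int × Int)) (out : List Int) : Decidable (Spec_Indicate_label_ge ins_label pre_seg out) := by unfold Spec_Indicate_label_ge; infer_instance

-- ===== CLAIM (what is proved, stated in full; the proofs are below) =====
def Claim_equal_Indicate_label_ge : Prop := ∀ (ins_label : List (Int × Int)) (pre_seg : List (Int × Int)), Dom_Indicate_label_ge ins_label pre_seg → Spec_Indicate_label_ge ins_label pre_seg (Indicate_label_ge ins_label pre_seg)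

-- ===== LEMMAS AND PROOFS =====

-- clean recursive description of the running-max / running-min loops
def rmxSpec (m : Int) : List Int → List Int
  | [] => []
  | e :: t => (max m e) :: rmxSpec (max m e) t

def rmnSpec (m : Int) : List Int → List Int
  | [] => []
  | e :: t => (min m e) :: rmnSpec (min m e) t

theorem pvRunMax_fold (xs : List Int) (m : Int) (acc : List Int) :
    (xs.foldl (fun st e =>
      let m' := match st.1 with | none => e | some m0 => if e > m0 then e else m0
      ((some m' : Option Int), st.2 ++ [m'])) (some m, acc)).2 = acc ++ rmxSpec m xs := by
  induction xs generalizing m acc with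
  | nil => simp [rmxSpec]
  | cons e t ih =>
    have hmax : (if e > m then e else m) = max m e := by
      rcases le_total e m with h | h <;> simp [max_def] <;> omega
    simp only [List.foldl_cons, hmax, ih, rmxSpec, List.append_assoc, List.singleton_append]

theorem pvRunMin_fold (xs : List Int) (m : Int) (acc : List Int) :
    (xs.foldl (fun st e =>
      let m' := match st.1 with | none => e | some m0 => if e < m0 then e else m0
      ((some m' : Option Int), st.2 ++ [m'])) (some m, acc)).2 = acc ++ rmnSpec m xs := by
  induction xs generalizing m acc with
  | nil => simp [rmnSpec]
  | cons e t ih =>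
    have hmin : (if e < m then e else m) = min m e := by
      rcases le_total e m with h | h <;> simp [min_def] <;> omega
    simp only [List.foldl_cons, hmin, ih, rmnSpec, List.append_assoc, List.singleton_append]

theorem pvRunMax_cons (e : Int) (t : List Int) : pvRunMax (e :: t) = e :: rmxSpec e t := by
  simp only [pvRunMax, List.foldl_cons]
  rw [pvRunMax_fold]
  simp

theorem pvRunMin_cons (e : Int) (t : List Int) : pvRunMin (e :: t) = e :: rmnSpec e t := by
  simp only [pvRunMin, List.foldl_cons]
  rw [pvRunMin_fold]
  simp

theorem rmnSpec_length (m : Int) (xs : List Int) : (rmnSpec m xs).length = xs.length := by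
  induction xs generalizing m with
  | nil => rfl
  | cons e t ih => simp [rmnSpec, ih]

theorem rmxSpec_getD (m : Int) (xs : List Int) (i : Nat) (hi : i < xs.length) :
    (rmxSpec m xs).getD i 0 = (xs.take (i + 1)).foldl max m := by
  induction xs generalizing m i with
  | nil => simp at hi
  | cons e t ih =>
    cases i with
    | zero => simp [rmxSpec]
    | succ j =>
      simp only [rmxSpec, List.getD_cons_succ, List.take_succ_cons, List.foldl_cons]
      exact ih (max m e) j (by simpa using hi)

theorem rmnSpec_getD (m : Int) (xs : List Int) (i : Nat) (hi : i < xs.length) :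
    (rmnSpec m xs).getD i 0 = (xs.take (i + 1)).foldl min m := by
  induction xs generalizing m i with
  | nil => simp at hi
  | cons e t ih =>
    cases i with
    | zero => simp [rmnSpec]
    | succ j =>
      simp only [rmnSpec, List.getD_cons_succ, List.take_succ_cons, List.foldl_cons]
      exact ih (min m e) j (by simpa using hi)

-- prefix-max query: y ≤ prefmax[k-1]  ⟺  some of the first k entries reaches y
theorem prefmax_ge_iff (xs : List Int) (k : Nat) (hk0 : 0 < k) (hkn : k ≤ xs.length) (y : Int) :
    y ≤ (pvRunMax xs).getD (k - 1) 0 ↔ ∃ j, j < k ∧ y ≤ xs.getD j 0 := by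
  obtain ⟨e, t, rfl⟩ : ∃ e t, xs = e :: t := by
    cases xs with
    | nil => simp at hkn; omega
    | cons e t => exact ⟨e, t, rfl⟩
  rw [pvRunMax_cons]
  cases k with
  | zero => omega
  | succ k' =>
    simp only [Nat.add_sub_cancel]
    cases k' with
    | zero =>
      constructor
      · intro h; exact ⟨0, by omega, by simpa using h⟩
      · rintro ⟨j, hj, hy⟩
        have : j = 0 := by omega
        subst this; simpa using hy
    | succ k'' =>
      have hk'' : k'' < t.length := by simp at hkn; omega
      rw [List.getD_cons_succ, rmxSpec_getD e t k'' hk'']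
      have hlen : (t.take (k'' + 1)).length = k'' + 1 := by
        rw [List.length_take]; omega
      constructor
      · intro h
        rcases PySem.List.foldl_max_mem (t.take (k'' + 1)) e with hm | hm
        · exact ⟨0, by omega, by rw [hm] at h; simpa using h⟩
        · obtain ⟨j, hj, hjv⟩ := List.getElem_of_mem hm
          refine ⟨j + 1, by omega, ?_⟩
          rw [List.getElem_take] at hjv
          rw [List.getD_cons_succ, List.getD_eq_getElem t 0 (by omega), hjv]
          exact h
      · rintro ⟨j, hj, hy⟩
        cases j with
        | zero =>
          simp only [List.getD_cons_zero] at hy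
          exact le_trans hy (PySem.List.le_foldl_max (t.take (k'' + 1)) e).1
        | succ j' =>
          have hj' : j' < t.length := by omega
          rw [List.getD_cons_succ, List.getD_eq_getElem t 0 hj'] at hy
          have hmem : t[j'] ∈ t.take (k'' + 1) := by
            have h1 : (t.take (k'' + 1))[j']'(by rw [hlen]; omega) = t[j'] :=
              List.getElem_take
            exact h1 ▸ List.getElem_mem _
          exact le_trans hy ((PySem.List.le_foldl_max (t.take (k'' + 1)) e).2 _ hmem)

-- prefix-min twin, used through the reversal below
theorem prefmin_le_iff (xs : List Int) (k : Nat) (hk0 : 0 < k) (hkn : k ≤ xs.length) (y : Int) :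
    (pvRunMin xs).getD (k - 1) 0 ≤ y ↔ ∃ j, j < k ∧ xs.getD j 0 ≤ y := by
  obtain ⟨e, t, rfl⟩ : ∃ e t, xs = e :: t := by
    cases xs with
    | nil => simp at hkn; omega
    | cons e t => exact ⟨e, t, rfl⟩
  rw [pvRunMin_cons]
  cases k with
  | zero => omega
  | succ k' =>
    simp only [Nat.add_sub_cancel]
    cases k' with
    | zero =>
      constructor
      · intro h; exact ⟨0, by omega, by simpa using h⟩
      · rintro ⟨j, hj, hy⟩
        have : j = 0 := by omega
        subst this; simpa using hy
    | succ k'' =>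
      have hk'' : k'' < t.length := by simp at hkn; omega
      rw [List.getD_cons_succ, rmnSpec_getD e t k'' hk'']
      have hlen : (t.take (k'' + 1)).length = k'' + 1 := by
        rw [List.length_take]; omega
      constructor
      · intro h
        rcases PySem.List.foldl_min_mem (t.take (k'' + 1)) e with hm | hm
        · exact ⟨0, by omega, by rw [hm] at h; simpa using h⟩
        · obtain ⟨j, hj, hjv⟩ := List.getElem_of_mem hm
          refine ⟨j + 1, by omega, ?_⟩
          rw [List.getElem_take] at hjv
          rw [List.getD_cons_succ, List.getD_eq_getElem t 0 (by omega), hjv]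
          exact h
      · rintro ⟨j, hj, hy⟩
        cases j with
        | zero =>
          simp only [List.getD_cons_zero] at hy
          exact le_trans (PySem.List.foldl_min_le (t.take (k'' + 1)) e).1 hy
        | succ j' =>
          have hj' : j' < t.length := by omega
          rw [List.getD_cons_succ, List.getD_eq_getElem t 0 hj'] at hy
          have hmem : t[j'] ∈ t.take (k'' + 1) := by
            have h1 : (t.take (k'' + 1))[j']'(by rw [hlen]; omega) = t[j'] :=
              List.getElem_take
            exact h1 ▸ List.getElem_mem _
          exact le_trans ((PySem.List.foldl_min_le (t.take (k'' + 1)) e).2 _ hmem) hy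

-- suffix-min query: sufmin[k] ≤ y  ⟺  some entry from index k on is ≤ y
theorem pvRunMin_length (xs : List Int) : (pvRunMin xs).length = xs.length := by
  cases xs with
  | nil => rfl
  | cons e t => rw [pvRunMin_cons]; simp [rmnSpec_length]

theorem sufmin_le_iff (xs : List Int) (k : Nat) (hk : k < xs.length) (y : Int) :
    ((pvRunMin xs.reverse).reverse).getD k 0 ≤ y ↔
      ∃ j, k ≤ j ∧ j < xs.length ∧ xs.getD j 0 ≤ y := by
  have hlenrm : (pvRunMin xs.reverse).length = xs.length := by
    rw [pvRunMin_length, List.length_reverse]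
  have hgd : ((pvRunMin xs.reverse).reverse).getD k 0
      = (pvRunMin xs.reverse).getD (xs.length - 1 - k) 0 := by
    rw [List.getD_eq_getElem _ 0 (by simpa [hlenrm] using hk),
        List.getElem_reverse, List.getD_eq_getElem _ 0 (by omega)]
    congr 1
    omega
  rw [hgd]
  have hk1 : 0 < xs.length - k := by omega
  have hk2 : xs.length - k ≤ xs.reverse.length := by simp
  have hiff := prefmin_le_iff xs.reverse (xs.length - k) hk1 hk2 y
  have heq : xs.length - k - 1 = xs.length - 1 - k := by omega
  rw [heq] at hiff
  rw [hiff]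
  clear hiff hgd
  have hidx : ∀ j, j < xs.length →
      xs.reverse.getD j 0 = xs.getD (xs.length - 1 - j) 0 := by
    intro j hj
    rw [List.getD_eq_getElem _ 0 (by simpa using hj), List.getElem_reverse,
        List.getD_eq_getElem _ 0 (by omega)]
  constructor
  · rintro ⟨j, hj, hy⟩
    refine ⟨xs.length - 1 - j, by omega, by omega, ?_⟩
    rw [hidx j (by omega)] at hy
    exact hy
  · rintro ⟨j, hjk, hjn, hy⟩
    refine ⟨xs.length - 1 - j, by omega, ?_⟩
    rw [hidx (xs.length - 1 - j) (by omega)]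
    have hjj : xs.length - 1 - (xs.length - 1 - j) = j := by omega
    rw [hjj]
    exact hy

-- the two dominance queries, read off against the label list
theorem reachesUp_iff (labs : List (Int × Int))
    (hs : List.Pairwise (fun a b => a ≤ b) (labs.map (fun p => p.1))) (x y : Int) :
    pvReachesUp (labs.map (fun p => p.1)) (pvRunMax (labs.map (fun p => p.2))) x y = true ↔
      ∃ l ∈ labs, l.1 ≤ x ∧ y ≤ l.2 := by
  simp only [pvReachesUp, Bool.and_eq_true, decide_eq_true_eq]
  obtain ⟨hkn, hlo, hhi⟩ := PySem.List.bisectRight_spec (labs.map (fun p => p.1)) x hs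
  set k := PySem.List.bisectRight (labs.map (fun p => p.1)) x with hkdef
  simp only [List.length_map] at hkn hlo hhi
  constructor
  · rintro ⟨hk0, hy⟩
    rw [prefmax_ge_iff _ k hk0 (by simpa using hkn)] at hy
    obtain ⟨j, hjk, hyj⟩ := hy
    have hjn : j < labs.length := by omega
    refine ⟨labs[j], List.getElem_mem _, ?_, ?_⟩
    · have := hlo j (by simpa using hjn) hjk
      simpa using this
    · rwa [List.getD_eq_getElem _ 0 (by simpa using hjn), List.getElem_map] at hyj
  · rintro ⟨l, hl, hlx, hly⟩
    obtain ⟨j, hjn, rfl⟩ := List.getElem_of_mem hl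
    have hjk : j < k := by
      by_contra h
      have := hhi j (by simpa using hjn) (by omega)
      simp only [List.getElem_map] at this
      omega
    refine ⟨by omega, ?_⟩
    rw [prefmax_ge_iff _ k (by omega) (by simpa using hkn)]
    exact ⟨j, hjk, by rwa [List.getD_eq_getElem _ 0 (by simpa using hjn), List.getElem_map]⟩

theorem reachesDown_iff (labs : List (Int × Int))
    (hs : List.Pairwise (fun a b => a ≤ b) (labs.map (fun p => p.1))) (x y : Int) :
    pvReachesDown (labs.map (fun p => p.1))
        ((pvRunMin (labs.map (fun p => p.2)).reverse).reverse) x y = true ↔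
      ∃ l ∈ labs, x ≤ l.1 ∧ l.2 ≤ y := by
  simp only [pvReachesDown, Bool.and_eq_true, decide_eq_true_eq, List.length_map]
  obtain ⟨hkn, hlo, hhi⟩ := PySem.List.bisectLeft_spec (labs.map (fun p => p.1)) x hs
  set k := PySem.List.bisectLeft (labs.map (fun p => p.1)) x with hkdef
  simp only [List.length_map] at hkn hlo hhi
  constructor
  · rintro ⟨hk, hy⟩
    rw [sufmin_le_iff _ k (by simpa using hk)] at hy
    obtain ⟨j, hkj, hjn, hyj⟩ := hy
    simp only [List.length_map] at hjn
    refine ⟨labs[j], List.getElem_mem _, ?_, ?_⟩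
    · have := hhi j (by simpa using hjn) hkj
      simpa using this
    · rwa [List.getD_eq_getElem _ 0 (by simpa using hjn), List.getElem_map] at hyj
  · rintro ⟨l, hl, hlx, hly⟩
    obtain ⟨j, hjn, rfl⟩ := List.getElem_of_mem hl
    have hkj : k ≤ j := by
      by_contra h
      have := hlo j (by simpa using hjn) (by omega)
      simp only [List.getElem_map] at this
      omega
    refine ⟨by omega, ?_⟩
    rw [sufmin_le_iff _ k (by simp; omega)]
    exact ⟨j, hkj, by simpa using hjn,
      by rwa [List.getD_eq_getElem _ 0 (by simpa using hjn), List.getElem_map]⟩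

-- A's four-branch test as a disjunction
theorem juCover_iff (s l : Int × Int) :
    juCover s l = true ↔
      (s.1 ≤ l.2 ∧ l.1 ≤ s.1) ∨ (s.2 ≤ l.2 ∧ l.1 ≤ s.2) ∨
      (s.1 ≤ l.1 ∧ s.2 ≥ l.2) ∨ (s.1 ≥ l.1 ∧ s.2 ≤ l.2) := by
  simp only [juCover]
  split_ifs <;> simp_all

-- A's inner Flag loop computes an 'any'.
theorem flag_fold_eq_any (s : Int × Int) (ls : List (Int × Int)) (a : Int) :
    ls.foldl (fun fl label => if juCover s label then 1 else fl) a
      = if ls.any (fun label => juCover s label) then 1 else a := by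
  induction ls generalizing a with
  | nil => simp
  | cons l ls ih =>
    simp only [List.foldl_cons, List.any_cons, ih]
    by_cases h : juCover s l = true
    · simp [h]
    · simp only [Bool.not_eq_true] at h
      simp only [h, Bool.false_or, Bool.false_eq_true, if_false]

-- both outer loops are appends of one entry per segment, i.e. a map
theorem foldl_append_map (xs : List (Int × Int)) (g : Int × Int → Int) (acc : List Int)
    (f : List Int → Int × Int → List Int)
    (hf : ∀ ind x, f ind x = ind ++ [g x]) :
    xs.foldl f acc = acc ++ xs.map g := by
  induction xs generalizing acc with
  | nil => simp
  | cons x xs ih => simp [hf, ih]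

theorem indicate_A_eq_map (ins_label pre_seg : List (Int × Int)) :
    Indicate_label_ge ins_label pre_seg
      = pre_seg.map (fun sg =>
          if ins_label.any (fun l => juCover (sg.1 + 1, sg.2 + 1) l) then (1 : Int) else 0) := by
  unfold Indicate_label_ge
  rw [foldl_append_map (g := fun sg =>
      if ins_label.any (fun l => juCover (sg.1 + 1, sg.2 + 1) l) then (1 : Int) else 0)]
  · simp
  · intro ind x
    simp only [flag_fold_eq_any]
    by_cases h : (List.any ins_label fun l => juCover (x.1 + 1, x.2 + 1) l) = true <;> simp [h]

-- per segment, B's four queries answer exactly A's 'any label covers'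
theorem hit_eq_any (ins_label : List (Int × Int)) (sg : Int × Int) :
    (pvReachesUp ((PySem.List.sorted ins_label (fun p => p.1) false).map (fun p => p.1))
        (pvRunMax ((PySem.List.sorted ins_label (fun p => p.1) false).map (fun p => p.2)))
        (sg.1 + 1) (sg.1 + 1) ||
     pvReachesUp ((PySem.List.sorted ins_label (fun p => p.1) false).map (fun p => p.1))
        (pvRunMax ((PySem.List.sorted ins_label (fun p => p.1) false).map (fun p => p.2)))
        (sg.2 + 1) (sg.2 + 1) ||
     pvReachesUp ((PySem.List.sorted ins_label (fun p => p.1) false).map (fun p => p.1))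
        (pvRunMax ((PySem.List.sorted ins_label (fun p => p.1) false).map (fun p => p.2)))
        (sg.1 + 1) (sg.2 + 1) ||
     pvReachesDown ((PySem.List.sorted ins_label (fun p => p.1) false).map (fun p => p.1))
        ((pvRunMin ((PySem.List.sorted ins_label (fun p => p.1) false).map (fun p => p.2)).reverse).reverse)
        (sg.1 + 1) (sg.2 + 1))
      = ins_label.any (fun l => juCover (sg.1 + 1, sg.2 + 1) l) := by
  set labs := PySem.List.sorted ins_label (fun p => p.1) false with hlabs
  have hs : List.Pairwise (fun a b => a ≤ b) (labs.map (fun p => p.1)) :=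
    PySem.List.sorted_map_key_pairwise ins_label (fun p => p.1)
  rw [Bool.eq_iff_iff]
  simp only [Bool.or_eq_true, List.any_eq_true]
  rw [reachesUp_iff labs hs, reachesUp_iff labs hs, reachesUp_iff labs hs,
      reachesDown_iff labs hs]
  have hmem : ∀ l : Int × Int, l ∈ labs ↔ l ∈ ins_label := fun l =>
    PySem.List.mem_sorted ins_label (fun p => p.1) false l
  constructor
  · rintro (((⟨l, hl, h1, h2⟩ | ⟨l, hl, h1, h2⟩) | ⟨l, hl, h1, h2⟩) | ⟨l, hl, h1, h2⟩) <;>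
      exact ⟨l, (hmem l).mp hl, by rw [juCover_iff]; simp; tauto⟩
  · rintro ⟨l, hl, hc⟩
    rw [juCover_iff] at hc
    simp only at hc
    rcases hc with ⟨h1, h2⟩ | ⟨h1, h2⟩ | ⟨h1, h2⟩ | ⟨h1, h2⟩
    · exact Or.inl (Or.inl (Or.inl ⟨l, (hmem l).mpr hl, h2, h1⟩))
    · exact Or.inl (Or.inl (Or.inr ⟨l, (hmem l).mpr hl, h2, h1⟩))
    · exact Or.inr ⟨l, (hmem l).mpr hl, h1, h2⟩
    · exact Or.inl (Or.inr ⟨l, (hmem l).mpr hl, h1, h2⟩)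

theorem indicate_B_eq_map (ins_label pre_seg : List (Int × Int)) :
    Indicate_label_ge_alt ins_label pre_seg
      = pre_seg.map (fun sg =>
          if ins_label.any (fun l => juCover (sg.1 + 1, sg.2 + 1) l) then (1 : Int) else 0) := by
  unfold Indicate_label_ge_alt
  rw [foldl_append_map (g := fun sg =>
      if ins_label.any (fun l => juCover (sg.1 + 1, sg.2 + 1) l) then (1 : Int) else 0)]
  · simp
  · intro ind sg
    dsimp only
    rw [hit_eq_any ins_label sg]

-- ===== VERDICT (by name: the statement is the Claim_ definition above) =====
theorem Indicate_label_ge_spec : Claim_equal_Indicate_label_ge := by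
  intro ins_label pre_seg _
  unfold Spec_Indicate_label_ge
  rw [indicate_A_eq_map, indicate_B_eq_map]
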